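-- pv_equiv track=rewrite | github.com/rdearman/lute-v3 | lute/book/model.py | _split_text_at_page_breaks
-- ===== SOURCE A (Python) =====
-- def _split_text_at_page_breaks(txt):
--     "Break fulltext manually at lines consisting of '---' only."
--     # Tried doing this with a regex without success.
--     segments = []
--     current_segment = ""
--     for line in txt.split("\n"):
--         if line.strip() == "---":
--             segments.append(current_segment.strip())
--             current_segment = ""
--         else:
--             current_segment += line + "\n"
--     if current_segment:
--         segments.append(current_segment.strip())
--     return segments
-- ===== SOURCE B (Python) =====
-- def _split_text_at_page_breaks(txt):
--     "Break fulltext at '---' lines by recursively splitting at the first delimiter."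
--     def rec(lines):
--         for i, line in enumerate(lines):
--             if line.strip() == "---":
--                 return ["\n".join(lines[:i]).strip()] + rec(lines[i + 1:])
--         return ["\n".join(lines).strip()] if lines else []
--     return rec(txt.split("\n"))
-- ===== Notes on version B (the rewrite author's own statement) =====
-- stated objective: alternative
-- what changed: A accumulates one growing string across a single pass, flushing it at each '---' line; B splits into lines and recursively finds the first delimiter line, emitting '\n'.join of the prefix (stripped) and recursing on the suffix.
import Mathlib
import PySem

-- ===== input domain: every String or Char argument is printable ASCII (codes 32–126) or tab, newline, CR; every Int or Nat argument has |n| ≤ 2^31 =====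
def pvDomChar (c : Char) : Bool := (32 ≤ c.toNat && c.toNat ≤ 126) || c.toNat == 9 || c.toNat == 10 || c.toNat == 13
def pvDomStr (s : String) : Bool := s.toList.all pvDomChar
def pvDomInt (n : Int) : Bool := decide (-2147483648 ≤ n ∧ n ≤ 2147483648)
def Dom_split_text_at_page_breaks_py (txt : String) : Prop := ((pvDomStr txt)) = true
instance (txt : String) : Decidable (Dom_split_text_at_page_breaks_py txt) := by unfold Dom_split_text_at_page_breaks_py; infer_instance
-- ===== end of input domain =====

-- B replaces A's single accumulating pass with a recursive "split at the first '---' line" decomposition; objective: alternative (same cost, different shape).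

-- ===== PORT A =====
-- loop body of A's for-loop: state = (segments, current_segment)
def pvStepA (st : List String × String) (line : String) : List String × String :=
  if PySem.Str.strip line == "---" then (st.1 ++ [PySem.Str.strip st.2], "")
  else (st.1, st.2 ++ line ++ "\n")

-- trailing 'if current_segment: segments.append(current_segment.strip())'
def pvFinA (st : List String × String) : List String :=
  if st.2 ≠ "" then st.1 ++ [PySem.Str.strip st.2] else st.1

def split_text_at_page_breaks_py (txt : String) : List String :=
  -- txt.split("\n"): sep "\n" ≠ "" so split? is always some; getD [] is unreachable
  pvFinA (((PySem.Str.split? txt "\n").getD []).foldl pvStepA ([], ""))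

-- ===== PORT B =====
-- Source B's rec: scan for the first delimiter line (the for/enumerate loop = findIdx?),
-- emit the joined-and-stripped prefix, recurse on the suffix after it.
def pvRec (lines : List String) : List String :=
  match h : lines.findIdx? (fun l => PySem.Str.strip l == "---") with
  | some i =>
      PySem.Str.strip (PySem.Str.join "\n" (lines.take i)) :: pvRec (lines.drop (i + 1))
  | none =>
      if lines.isEmpty then [] else [PySem.Str.strip (PySem.Str.join "\n" lines)]
termination_by lines.length
decreasing_by
  cases lines with
  | nil => simp at h
  | cons a as => simp [List.length_drop]

def split_text_at_page_breaks_py_alt (txt : String) : List String :=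
  pvRec ((PySem.Str.split? txt "\n").getD [])

-- ===== PRECONDITION & SPEC =====
def Spec_split_text_at_page_breaks_py (txt : String) (out : List String) : Prop := out = split_text_at_page_breaks_py_alt txt
instance (txt : String) (out : List String) : Decidable (Spec_split_text_at_page_breaks_py txt out) := by unfold Spec_split_text_at_page_breaks_py; infer_instance

-- ===== CLAIM (what is proved, stated in full; the proofs are below) =====
def Claim_equal_split_text_at_page_breaks_py : Prop := ∀ (txt : String), Dom_split_text_at_page_breaks_py txt → Spec_split_text_at_page_breaks_py txt (split_text_at_page_breaks_py txt)

-- ===== LEMMAS AND PROOFS =====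

-- A's current_segment after consuming the (delimiter-free) lines `p` since the last delimiter
def pvCat : List String → String
  | [] => ""
  | l :: ls => l ++ "\n" ++ pvCat ls

lemma pvCat_append (p : List String) (l : String) :
    pvCat (p ++ [l]) = pvCat p ++ l ++ "\n" := by
  induction p with
  | nil => simp [pvCat]
  | cons x xs ih => simp [pvCat, ih, String.append_assoc]

lemma pvCat_eq_empty_iff (p : List String) : pvCat p = "" ↔ p = [] := by
  cases p with
  | nil => simp [pvCat]
  | cons l ls =>
    simp only [pvCat]
    constructor
    · intro hcontra
      have := congrArg String.toList hcontra
      simp at this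
    · intro hcontra; exact absurd hcontra (by simp)

lemma pvRec_none (lines : List String)
    (h : lines.findIdx? (fun l => PySem.Str.strip l == "---") = none) :
    pvRec lines = if lines.isEmpty then [] else [PySem.Str.strip (PySem.Str.join "\n" lines)] := by
  rw [pvRec]
  split <;> simp_all

lemma pvRec_some (lines : List String) (i : Nat)
    (h : lines.findIdx? (fun l => PySem.Str.strip l == "---") = some i) :
    pvRec lines = PySem.Str.strip (PySem.Str.join "\n" (lines.take i)) :: pvRec (lines.drop (i + 1)) := by
  rw [pvRec]
  split <;> simp_all

lemma pv_strip_append_nl (s : String) :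
    PySem.Str.strip (s ++ "\n") = PySem.Str.strip s := by
  apply String.ext_iff.mpr
  simp only [PySem.Str.toList_strip]
  have h1 : (s ++ "\n").toList = s.toList ++ ['\n'] := by simp
  rw [h1]
  unfold PySem.Chars.strip PySem.Chars.lstrip PySem.Chars.rstrip
  rw [List.dropWhile_append]
  by_cases he : (List.dropWhile PySem.Chars.isspace s.toList).isEmpty
  · have h2 : List.dropWhile PySem.Chars.isspace ['\n'] = ([] : List Char) := by decide
    simp [h2, List.isEmpty_iff.mp he]
  · simp only [he, Bool.false_eq_true, if_neg, not_false_iff]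
    rw [List.reverse_append]
    simp only [List.reverse_singleton, List.singleton_append]
    rw [List.dropWhile_cons_of_pos (by decide)]

lemma pv_join_cons_cons (x y : String) (ys : List String) :
    PySem.Str.join "\n" (x :: y :: ys) = x ++ "\n" ++ PySem.Str.join "\n" (y :: ys) := by
  apply String.ext_iff.mpr
  simp [PySem.Str.join, PySem.Chars.join_cons_cons]

lemma pvCat_eq_join (p : List String) (hp : p ≠ []) :
    pvCat p = PySem.Str.join "\n" p ++ "\n" := by
  induction p with
  | nil => exact absurd rfl hp
  | cons x xs ih =>
    cases xs with
    | nil =>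
      apply String.ext_iff.mpr
      simp [pvCat, PySem.Str.join, PySem.Chars.join_singleton]
    | cons y ys =>
      rw [pvCat, ih (by simp), pv_join_cons_cons]
      apply String.ext_iff.mpr
      simp

lemma pv_strip_pvCat (p : List String) :
    PySem.Str.strip (pvCat p) = PySem.Str.strip (PySem.Str.join "\n" p) := by
  cases p with
  | nil =>
    have : PySem.Str.join "\n" ([] : List String) = "" := by decide
    rw [pvCat, this]
  | cons l ls =>
    rw [pvCat_eq_join (l :: ls) (by simp), pv_strip_append_nl]

lemma pvMain (lines : List String) : ∀ (pend segs : List String),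
    (∀ l ∈ pend, (PySem.Str.strip l == "---") = false) →
    pvFinA (lines.foldl pvStepA (segs, pvCat pend)) = segs ++ pvRec (pend ++ lines) := by
  induction lines with
  | nil =>
    intro pend segs hp
    have hidx : pend.findIdx? (fun l => PySem.Str.strip l == "---") = none :=
      List.findIdx?_eq_none_iff.mpr hp
    rw [List.append_nil, List.foldl_nil, pvRec_none pend hidx]
    cases hpe : pend with
    | nil => simp [pvFinA, pvCat]
    | cons x xs =>
      have hne : pvCat pend ≠ "" := by
        rw [hpe]; intro hc; simpa using (pvCat_eq_empty_iff (x :: xs)).mp hc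
      rw [← hpe]
      simp only [pvFinA, ne_eq, hne, not_false_iff]
      rw [pv_strip_pvCat]
      simp [hpe]
  | cons l rest ih =>
    intro pend segs hp
    by_cases hd : (PySem.Str.strip l == "---") = true
    · -- delimiter line
      have hstep : pvStepA (segs, pvCat pend) l = (segs ++ [PySem.Str.strip (pvCat pend)], "") := by
        simp [pvStepA, hd]
      have hidx : (pend ++ l :: rest).findIdx? (fun l => PySem.Str.strip l == "---")
          = some pend.length := by
        rw [List.findIdx?_append, List.findIdx?_eq_none_iff.mpr hp, List.findIdx?_cons, hd]
        simp
      rw [List.foldl_cons, hstep, pvRec_some _ _ hidx]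
      have htake : (pend ++ l :: rest).take pend.length = pend := List.take_left
      have hdrop : (pend ++ l :: rest).drop (pend.length + 1) = rest := by
        have : pend ++ l :: rest = (pend ++ [l]) ++ rest := by simp
        rw [this]
        have hlen : pend.length + 1 = (pend ++ [l]).length := by simp
        rw [hlen, List.drop_left]
      rw [htake, hdrop]
      have := ih [] (segs ++ [PySem.Str.strip (pvCat pend)]) (by simp)
      simp only [pvCat, List.nil_append] at this
      rw [this]
      rw [pv_strip_pvCat]
      simp
    · -- ordinary line
      have hstep : pvStepA (segs, pvCat pend) l = (segs, pvCat (pend ++ [l])) := by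
        simp [pvStepA, hd, pvCat_append]
      rw [List.foldl_cons, hstep]
      have hp' : ∀ x ∈ pend ++ [l], (PySem.Str.strip x == "---") = false := by
        intro x hx
        rcases List.mem_append.mp hx with h1 | h1
        · exact hp x h1
        · simp at h1; subst h1; simpa using hd
      have := ih (pend ++ [l]) segs hp'
      rw [this]
      simp

-- ===== VERDICT (by name: the statement is the Claim_ definition above) =====
theorem split_text_at_page_breaks_py_spec : Claim_equal_split_text_at_page_breaks_py := by
  intro txt _
  unfold Spec_split_text_at_page_breaks_py split_text_at_page_breaks_py split_text_at_page_breaks_py_alt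
  have := pvMain ((PySem.Str.split? txt "\n").getD []) [] [] (by simp)
  simpa [pvCat] using this
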